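-- pv_equiv track=rewrite | github.com/AdrianHObradors/AdventofCode | 2015/Day10/2015_10.py | get_lookie
-- ===== SOURCE A (Python) =====
-- def get_lookie(number):
--     step = 1
--     answer = ""
--     for i in range(len(number) - 1):
--         if number[i] == number[i+1]:
--             step += 1
--         else:
--             answer += str(step) + number[i]
--             step = 1
--     answer += str(step) + number[-1]
--     return answer
-- ===== SOURCE B (Python) =====
-- def get_lookie(number):
--     parts = []
--     i = 0
--     n = len(number)
--     while i < n:
--         j = i + 1
--         while j < n and number[j] == number[i]:
--             j += 1
--         parts.append(str(j - i) + number[i])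
--         i = j
--     return ''.join(parts)
-- ===== Notes on version B (the rewrite author's own statement) =====
-- stated objective: alternative
-- what changed: Replaces the pairwise index comparison with a running counter and the trailing special-case append by a two-pointer scan that finds each whole run at once, collects the pieces in a list and joins once.
import Mathlib
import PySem

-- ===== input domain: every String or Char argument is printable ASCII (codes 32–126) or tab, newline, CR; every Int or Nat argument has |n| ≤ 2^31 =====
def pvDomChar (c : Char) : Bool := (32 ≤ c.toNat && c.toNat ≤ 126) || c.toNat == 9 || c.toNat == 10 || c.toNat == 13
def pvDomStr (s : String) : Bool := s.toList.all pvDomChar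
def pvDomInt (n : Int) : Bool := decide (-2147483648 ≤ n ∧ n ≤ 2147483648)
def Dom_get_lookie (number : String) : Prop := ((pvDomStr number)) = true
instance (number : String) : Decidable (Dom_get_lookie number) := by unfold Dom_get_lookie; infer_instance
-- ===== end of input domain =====

-- B replaces A's pairwise index comparison and trailing special-case append by a
-- two-pointer scan over whole runs, collecting parts and joining once (alternative, same cost).

-- ===== PORT A =====
def get_lookie (number : String) : String :=
  let cs := number.toList
  let r := (PySem.List.pyRange 0 ((cs.length : Int) - 1) 1).foldl
    (fun (st : Int × List Char) i =>
      if PySem.List.pyGetD cs i ' ' == PySem.List.pyGetD cs (i + 1) ' ' then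
        (st.1 + 1, st.2)
      else
        (1, st.2 ++ PySem.Int.toChars st.1 ++ [PySem.List.pyGetD cs i ' ']))
    (1, [])
  String.ofList (r.2 ++ PySem.Int.toChars r.1 ++ [PySem.List.pyGetD cs (-1) ' '])

-- ===== PORT B =====
-- outer while: recursion on the remaining suffix (fuel = its length, a pure totality
-- guard: each step consumes at least one character); inner while: takeWhile finds the run end
def altLoopF : Nat → List Char → List (List Char) → List (List Char)
  | 0, _, parts => parts
  | _ + 1, [], parts => parts
  | fuel + 1, c :: rest, parts =>
      altLoopF fuel (rest.drop (rest.takeWhile (fun x => x == c)).length)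
        (parts ++ [PySem.Int.toChars (1 + ((rest.takeWhile (fun x => x == c)).length : Int)) ++ [c]])

def get_lookie_alt (number : String) : String :=
  String.ofList ((altLoopF number.toList.length number.toList []).flatten)

-- ===== PRECONDITION & SPEC =====
-- Pre_ excludes only the empty string, on which A raises IndexError (number[-1]).
def Pre_get_lookie (number : String) : Prop := number ≠ ""
instance (number : String) : Decidable (Pre_get_lookie number) := by unfold Pre_get_lookie; infer_instance
def pvWitness_get_lookie : String := "111221"

def Spec_get_lookie (number : String) (out : String) : Prop := out = get_lookie_alt number
instance (number : String) (out : String) : Decidable (Spec_get_lookie number out) := by unfold Spec_get_lookie; infer_instance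

-- ===== CLAIM (what is proved, stated in full; the proofs are below) =====
def Claim_equal_get_lookie : Prop := ∀ (number : String), Dom_get_lookie number → Pre_get_lookie number → Spec_get_lookie number (get_lookie number)

-- ===== LEMMAS AND PROOFS =====

-- A's body, after converting the index fold to natural indices
def gA (cs : List Char) (st : Int × List Char) (k : Nat) : Int × List Char :=
  if cs.getD k ' ' == cs.getD (k + 1) ' ' then (st.1 + 1, st.2)
  else (1, st.2 ++ PySem.Int.toChars st.1 ++ [cs.getD k ' '])

-- A's loop as structural recursion on the list
def loopA : List Char → Int × List Char → List Char
  | [], st => st.2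
  | [a], st => st.2 ++ PySem.Int.toChars st.1 ++ [a]
  | a :: b :: rest, st =>
      loopA (b :: rest) (if a == b then (st.1 + 1, st.2) else (1, st.2 ++ PySem.Int.toChars st.1 ++ [a]))

-- the fold in port A, named so that the let-bound definition can be unfolded by rfl
def foldAI (cs : List Char) : Int × List Char :=
  (PySem.List.pyRange 0 ((cs.length : Int) - 1) 1).foldl
    (fun (st : Int × List Char) i =>
      if PySem.List.pyGetD cs i ' ' == PySem.List.pyGetD cs (i + 1) ' ' then
        (st.1 + 1, st.2)
      else
        (1, st.2 ++ PySem.Int.toChars st.1 ++ [PySem.List.pyGetD cs i ' ']))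
    (1, [])

lemma get_lookie_def (number : String) :
    get_lookie number = String.ofList ((foldAI number.toList).2 ++
      PySem.Int.toChars (foldAI number.toList).1 ++ [PySem.List.pyGetD number.toList (-1) ' ']) := rfl

lemma altLoopF_nil : ∀ (fuel : Nat) (parts : List (List Char)), altLoopF fuel [] parts = parts := by
  intro fuel parts
  cases fuel <;> rfl

lemma altLoopF_append : ∀ (fuel : Nat) (cs : List Char) (parts : List (List Char)),
    altLoopF fuel cs parts = parts ++ altLoopF fuel cs [] := by
  intro fuel
  induction fuel with
  | zero => intro cs parts; simp [altLoopF]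
  | succ f ih =>
      intro cs parts
      match cs with
      | [] => simp [altLoopF]
      | c :: rest =>
          rw [altLoopF, altLoopF, ih _ (parts ++ _), ih _ ([] ++ _)]
          simp

lemma altLoopF_fuel : ∀ (fuel fuel' : Nat) (cs : List Char) (parts : List (List Char)),
    cs.length ≤ fuel → cs.length ≤ fuel' → altLoopF fuel cs parts = altLoopF fuel' cs parts := by
  intro fuel
  induction fuel with
  | zero =>
      intro fuel' cs parts h h'
      cases cs with
      | nil => rw [altLoopF_nil, altLoopF_nil]
      | cons c r => simp at h
  | succ f ih =>
      intro fuel' cs parts h h'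
      cases cs with
      | nil => rw [altLoopF_nil, altLoopF_nil]
      | cons c rest =>
          cases fuel' with
          | zero => simp at h'
          | succ f' =>
              rw [altLoopF, altLoopF]
              have hd : (rest.drop (rest.takeWhile (fun x => x == c)).length).length ≤ rest.length := by
                simp [List.length_drop]
              exact ih f' _ _ (by simp at h; omega) (by simp at h'; omega)

lemma runs_cons (c : Char) (rest : List Char) (fuel : Nat) :
    (altLoopF (fuel + 1) (c :: rest) []).flatten =
      PySem.Int.toChars (1 + ((rest.takeWhile (fun x => x == c)).length : Int)) ++
        c :: (altLoopF fuel (rest.drop (rest.takeWhile (fun x => x == c)).length) []).flatten := by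
  rw [altLoopF, altLoopF_append]
  simp

lemma foldA_eq_loopA : ∀ (cs : List Char) (h : cs ≠ []) (st : Int × List Char),
    ((List.range (cs.length - 1)).foldl (gA cs) st).2 ++
      PySem.Int.toChars ((List.range (cs.length - 1)).foldl (gA cs) st).1 ++ [cs.getLast h]
    = loopA cs st := by
  intro cs
  induction cs with
  | nil => intro h; exact absurd rfl h
  | cons c rest ih =>
      intro _ st
      match rest with
      | [] => simp [loopA]
      | b :: rs =>
          have hlen : (c :: b :: rs).length - 1 = (b :: rs).length := by simp
          rw [hlen]
          have hrange : List.range (b :: rs).length = 0 :: (List.range ((b :: rs).length - 1)).map Nat.succ := by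
            simp [List.range_succ_eq_map]
          rw [hrange]
          simp only [List.foldl_cons, List.foldl_map]
          have hg : (fun (st : Int × List Char) k => gA (c :: b :: rs) st (Nat.succ k)) = gA (b :: rs) := by
            funext st k
            simp [gA]
          have hg0 : gA (c :: b :: rs) st 0 =
              (if c == b then (st.1 + 1, st.2) else (1, st.2 ++ PySem.Int.toChars st.1 ++ [c])) := by
            simp [gA]
          have hlast : (c :: b :: rs).getLast (by simp) = (b :: rs).getLast (by simp) :=
            List.getLast_cons (by simp)
          rw [hg, hg0, hlast, ih (by simp)]
          rw [loopA]

lemma loopA_runs : ∀ (rest : List Char) (c : Char) (step : Int) (ans : List Char),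
    loopA (c :: rest) (step, ans) =
      ans ++ PySem.Int.toChars (step + ((rest.takeWhile (fun x => x == c)).length : Int)) ++
        c :: (altLoopF (rest.drop (rest.takeWhile (fun x => x == c)).length).length
                (rest.drop (rest.takeWhile (fun x => x == c)).length) []).flatten := by
  intro rest
  induction rest with
  | nil => intro c step ans; simp [loopA, altLoopF]
  | cons b rs ih =>
      intro c step ans
      rw [loopA]
      by_cases hcb : c = b
      · subst hcb
        simp only [beq_self_eq_true, if_true]
        rw [ih c (step + 1) ans]
        rw [List.takeWhile_cons_of_pos (by simp)]
        simp only [List.length_cons, List.drop_succ_cons]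
        have : step + 1 + ((rs.takeWhile (fun x => x == c)).length : Int)
             = step + (((rs.takeWhile (fun x => x == c)).length : Nat) + 1 : Nat) := by push_cast; ring
        rw [this]
      · have hne : (c == b) = false := by simp [hcb]
        rw [hne]
        simp only [if_false, Bool.false_eq_true]
        rw [ih b 1 (ans ++ PySem.Int.toChars step ++ [c])]
        rw [List.takeWhile_cons_of_neg (by simp [Ne.symm hcb])]
        simp only [List.length_nil, Nat.cast_zero, add_zero, List.drop_zero, List.length_cons]
        rw [runs_cons]
        have hd : (rs.drop (rs.takeWhile (fun x => x == b)).length).length ≤ rs.length := by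
          simp [List.length_drop]
        rw [altLoopF_fuel rs.length _ _ _ hd le_rfl]
        simp

-- ===== VERDICT (by name: the statement is the Claim_ definition above) =====
theorem get_lookie_spec : Claim_equal_get_lookie := by
  intro number _ hpre
  unfold Spec_get_lookie get_lookie_alt
  rw [get_lookie_def]
  have hcs : number.toList ≠ [] := by
    intro h
    apply hpre
    have := congrArg String.ofList h
    simpa using this
  generalize hcseq : number.toList = cs at *
  congr 1
  have htn : (((cs.length : Nat) : Int) - 1).toNat = cs.length - 1 := by omega
  have hrange : PySem.List.pyRange 0 ((cs.length : Int) - 1) 1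
      = (List.range (cs.length - 1)).map (fun k : Nat => ((k : Int))) := by
    rw [PySem.List.pyRange_one]
    simp [htn]
  unfold foldAI
  rw [hrange, List.foldl_map]
  have hf : (fun (st : Int × List Char) (k : Nat) =>
      if PySem.List.pyGetD cs (k : Int) ' ' == PySem.List.pyGetD cs ((k : Int) + 1) ' ' then
        (st.1 + 1, st.2)
      else (1, st.2 ++ PySem.Int.toChars st.1 ++ [PySem.List.pyGetD cs (k : Int) ' '])) = gA cs := by
    funext st k
    have h1 : ((k : Int) + 1) = ((k + 1 : Nat) : Int) := by push_cast; ring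
    rw [h1]
    simp only [PySem.List.pyGetD_natCast, gA]
  rw [hf]
  rw [PySem.List.pyGetD_neg_one cs ' ' hcs]
  rw [foldA_eq_loopA cs hcs (1, [])]
  match cs, hcs with
  | c :: rest, _ =>
      rw [loopA_runs, List.length_cons, runs_cons]
      have hd : (rest.drop (rest.takeWhile (fun x => x == c)).length).length ≤ rest.length := by
        simp [List.length_drop]
      rw [altLoopF_fuel rest.length _ _ _ hd le_rfl]
      simp
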